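-- pv_equiv track=rewrite | github.com/JulienDeveaux/queenBackTracking | main.py | notation
-- ===== SOURCE A (Python) =====
-- tailleGrille = 16
--
-- def notation(val, ligne):  # note la valeur de cases qui ne seront plus disponibles si on place la reine sur la ligne
--     res = (tailleGrille - ligne)  # colonne
--     for i in range(0, tailleGrille):
--         if val <= i:
--             res = res + 1  # une diagonale a droite en plus
--         if val >= i:
--             res = res + 1  # une diagonale a gauche en plus
--     return res
-- ===== SOURCE B (Python) =====
-- tailleGrille = 16
--
-- def notation(val, ligne):
--     # closed form: count of i in [0,16) with val<=i is 16-clamp(val,0,16); with val>=i is clamp(val+1,0,16)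
--     return (tailleGrille - ligne) + (tailleGrille - min(max(val, 0), tailleGrille)) + min(max(val + 1, 0), tailleGrille)
-- ===== Notes on version B (the rewrite author's own statement) =====
-- stated objective: simpler
-- what changed: Replaced the 16-iteration loop with two comparisons by a closed-form arithmetic expression using clamped counts of the diagonal cells.
import Mathlib
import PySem

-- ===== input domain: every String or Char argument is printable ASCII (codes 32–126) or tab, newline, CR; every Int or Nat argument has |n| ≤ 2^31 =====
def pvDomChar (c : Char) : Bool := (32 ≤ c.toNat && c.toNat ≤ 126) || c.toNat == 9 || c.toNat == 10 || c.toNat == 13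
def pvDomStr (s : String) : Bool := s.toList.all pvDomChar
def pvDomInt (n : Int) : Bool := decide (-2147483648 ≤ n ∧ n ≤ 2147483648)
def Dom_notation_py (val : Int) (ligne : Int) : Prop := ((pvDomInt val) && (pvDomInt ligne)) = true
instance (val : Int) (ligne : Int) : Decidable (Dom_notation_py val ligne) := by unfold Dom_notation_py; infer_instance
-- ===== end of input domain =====

-- ===== PORT A =====
-- one honest line: B replaces A's fixed 16-step loop by a closed-form clamped-count formula (simpler).
def notation_py (val : Int) (ligne : Int) : Int :=
  (PySem.List.pyRange 0 16 1).foldl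
    (fun res i =>
      let res := if val ≤ i then res + 1 else res
      if val ≥ i then res + 1 else res)
    (16 - ligne)

-- ===== PORT B =====
def notation_py_alt (val : Int) (ligne : Int) : Int :=
  (16 - ligne) + (16 - min (max val 0) 16) + min (max (val + 1) 0) 16

-- ===== PRECONDITION & SPEC =====
def Spec_notation_py (val : Int) (ligne : Int) (out : Int) : Prop := out = notation_py_alt val ligne
instance (val : Int) (ligne : Int) (out : Int) : Decidable (Spec_notation_py val ligne out) := by unfold Spec_notation_py; infer_instance

-- ===== CLAIM (what is proved, stated in full; the proofs are below) =====
def Claim_equal_notation_py : Prop := ∀ (val : Int) (ligne : Int), Dom_notation_py val ligne → Spec_notation_py val ligne (notation_py val ligne)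

-- ===== LEMMAS AND PROOFS =====
-- A's loop body does two independent +1 tests; the fold is the start value plus the two counts.
theorem notation_loop_eq_counts (val : Int) (l : List Int) (r : Int) :
    l.foldl (fun res i =>
        let res := if val ≤ i then res + 1 else res
        if val ≥ i then res + 1 else res) r
      = r + (l.countP (fun i => decide (val ≤ i)) : Int)
          + (l.countP (fun i => decide (i ≤ val)) : Int) := by
  induction l generalizing r with
  | nil => simp
  | cons a t ih =>
      simp only [List.foldl_cons, List.countP_cons, ih]
      by_cases h1 : val ≤ a <;> by_cases h2 : a ≤ val <;>
        simp [h1, h2, ge_iff_le] <;> ring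


-- ===== VERDICT (by name: the statement is the Claim_ definition above) =====
theorem notation_py_spec : Claim_equal_notation_py := by
  intro val ligne _
  unfold Spec_notation_py notation_py notation_py_alt
  rw [show PySem.List.pyRange 0 16 1 = [0,1,2,3,4,5,6,7,8,9,10,11,12,13,14,15] from by decide]
  rw [notation_loop_eq_counts]
  rcases lt_or_ge val 0 with hneg | hpos
  · rw [List.countP_eq_length.mpr (by intro a ha; simp at ha; simp; omega),
        List.countP_eq_zero.mpr (by intro a ha; simp at ha; simp; omega)]
    simp; omega
  · rcases le_or_gt val 15 with hle | hgt
    · interval_cases val <;> (norm_num [List.countP_cons, List.countP_nil]; try omega)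
    · rw [List.countP_eq_zero.mpr (by intro a ha; simp at ha; simp; omega),
          List.countP_eq_length.mpr (by intro a ha; simp at ha; simp; omega)]
      simp; omega
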